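-- pv_equiv track=rewrite | github.com/thirupathireddy665/crossbeam | src_training/bustle_generated_properties.py | is_contains_period
-- ===== SOURCE A (Python) =====
-- AllTrue = -1
--
-- Mixed = 0
--
-- AllFalse = 1
--
-- def is_contains_period(inputs):
--     is_true_present = False
--     is_false_present = False
--     for program_input in inputs:
--         if "." in program_input:
--             is_true_present = True
--         else:
--             is_false_present = True
--
--     if is_true_present and is_false_present:
--         return Mixed
--     elif is_true_present:
--         return AllTrue
--     else:
--         return AllFalse
-- ===== SOURCE B (Python) =====
-- AllTrue = -1
--
-- Mixed = 0
--
-- AllFalse = 1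
--
-- def is_contains_period(inputs):
--     if not any("." in p for p in inputs):
--         return AllFalse
--     if all("." in p for p in inputs):
--         return AllTrue
--     return Mixed
-- ===== Notes on version B (the rewrite author's own statement) =====
-- stated objective: idiomatic
-- what changed: Replaces the single accumulator loop with two boolean flags by staged short-circuiting any()/all() generator passes: return AllFalse if no input contains a period, else AllTrue if all do, else Mixed.
import Mathlib
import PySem

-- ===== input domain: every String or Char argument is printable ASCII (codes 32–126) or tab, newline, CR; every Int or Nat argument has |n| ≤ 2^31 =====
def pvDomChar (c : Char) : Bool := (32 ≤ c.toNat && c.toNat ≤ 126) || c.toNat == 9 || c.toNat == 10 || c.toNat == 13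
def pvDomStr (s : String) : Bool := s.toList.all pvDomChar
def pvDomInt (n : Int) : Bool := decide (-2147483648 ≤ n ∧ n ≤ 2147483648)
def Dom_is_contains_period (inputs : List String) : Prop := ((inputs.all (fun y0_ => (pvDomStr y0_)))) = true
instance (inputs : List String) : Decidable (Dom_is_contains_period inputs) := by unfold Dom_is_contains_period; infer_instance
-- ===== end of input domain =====

-- B replaces A's flag-accumulating loop with staged short-circuiting any/all passes (idiomatic decomposition, same cost).

-- ===== PORT A =====
def is_contains_period (inputs : List String) : Int :=
  let st := inputs.foldl
    (fun (st : Bool × Bool) program_input =>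
      if PySem.Str.isIn "." program_input then (true, st.2) else (st.1, true))
    (false, false)
  if st.1 && st.2 then 0 else if st.1 then -1 else 1

-- ===== PORT B =====
def is_contains_period_alt (inputs : List String) : Int :=
  if !(inputs.any (fun p => PySem.Str.isIn "." p)) then 1
  else if inputs.all (fun p => PySem.Str.isIn "." p) then -1
  else 0

-- ===== PRECONDITION & SPEC =====
def Spec_is_contains_period (inputs : List String) (out : Int) : Prop := out = is_contains_period_alt inputs
instance (inputs : List String) (out : Int) : Decidable (Spec_is_contains_period inputs out) := by unfold Spec_is_contains_period; infer_instance

-- ===== CLAIM (what is proved, stated in full; the proofs are below) =====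
def Claim_equal_is_contains_period : Prop := ∀ (inputs : List String), Dom_is_contains_period inputs → Spec_is_contains_period inputs (is_contains_period inputs)

-- ===== LEMMAS AND PROOFS =====

/-- A's fold computes exactly (any contains-period, any not-contains-period). -/
theorem is_contains_period_fold_eq (l : List String) (t f : Bool) :
    l.foldl
      (fun (st : Bool × Bool) program_input =>
        if PySem.Str.isIn "." program_input then (true, st.2) else (st.1, true))
      (t, f)
    = (t || l.any (fun p => PySem.Str.isIn "." p),
       f || l.any (fun p => !PySem.Str.isIn "." p)) := by
  induction l generalizing t f with
  | nil => simp
  | cons x xs ih =>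
    rw [List.foldl_cons, List.any_cons, List.any_cons]
    by_cases hx : PySem.Str.isIn "." x = true
    · rw [if_pos hx, ih]; simp_all
    · rw [if_neg hx, ih]; simp_all

-- ===== VERDICT (by name: the statement is the Claim_ definition above) =====
theorem is_contains_period_spec : Claim_equal_is_contains_period := by
  intro inputs _
  unfold Spec_is_contains_period is_contains_period is_contains_period_alt
  rw [is_contains_period_fold_eq]
  simp only [Bool.false_or]
  rcases h1 : inputs.any (fun p => PySem.Str.isIn "." p) with _ | _ <;>
  rcases h2 : inputs.any (fun p => !PySem.Str.isIn "." p) with _ | _ <;>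
    simp_all [List.all_eq_not_any_not]
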